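-- pv_equiv track=rewrite | github.com/venky1908112-droid/DSA | 4115-minimum-distance-between-three-equal-elements-i/minimum-distance-between-three-equal-elements-i.py | minimumDistance
-- ===== SOURCE A (Python) =====
-- from typing import List
--
-- def minimumDistance(nums: List[int]) -> int:
--     n = len(nums)
--     mn = float('inf')
--     for i in range(n):
--         for j in range(i+1, n):
--             for k in range(j + 1,n):
--                 if nums[i] == nums[j] == nums[k]:
--                     mn = min(mn, abs(i - j) + abs(j - k) + abs(k - i))
--     return -1 if mn == float('inf') else mn
-- ===== SOURCE B (Python) =====
-- from typing import List
--
-- def minimumDistance(nums: List[int]) -> int: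
--     best = None
--     pos = {}  # value -> list of its positions seen so far
--     for k in range(len(nums)):
--         v = nums[k]
--         ps = pos.get(v, [])
--         if len(ps) >= 2:
--             d = 2 * (k - ps[-2])
--             best = d if best is None else min(best, d)
--         pos[v] = ps + [k]
--     return -1 if best is None else best
-- ===== Notes on version B (the rewrite author's own statement) =====
-- stated objective: faster
-- what changed: Replaced the triple nested index loop with a single pass that keeps, per value, the list of positions seen so far and considers only 2*(k - second-to-last previous position of nums[k]) at each index.
import Mathlib
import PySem

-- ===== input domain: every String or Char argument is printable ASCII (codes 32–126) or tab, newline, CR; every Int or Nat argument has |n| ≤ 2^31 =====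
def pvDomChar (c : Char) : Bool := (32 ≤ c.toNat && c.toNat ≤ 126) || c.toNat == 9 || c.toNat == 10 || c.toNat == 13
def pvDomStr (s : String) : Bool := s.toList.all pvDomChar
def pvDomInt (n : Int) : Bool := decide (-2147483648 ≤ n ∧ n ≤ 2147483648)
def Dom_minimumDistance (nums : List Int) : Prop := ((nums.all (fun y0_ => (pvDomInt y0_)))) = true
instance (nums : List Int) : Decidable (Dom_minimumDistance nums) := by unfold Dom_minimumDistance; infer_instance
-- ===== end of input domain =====

-- B replaces A's O(n^3) triple loop by one pass that tracks, per value, the positions seen so far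
-- and considers only 2*(k - second-to-last previous position of nums[k]).

-- ===== PORT A =====
def minimumDistance (nums : List Int) : Int :=
  let n : Int := nums.length
  let mn : Option Int :=
    (PySem.List.pyRange 0 n 1).foldl (fun mn i =>
      (PySem.List.pyRange (i + 1) n 1).foldl (fun mn j =>
        (PySem.List.pyRange (j + 1) n 1).foldl (fun mn k =>
          if PySem.List.pyGetD nums i 0 = PySem.List.pyGetD nums j 0 ∧
             PySem.List.pyGetD nums j 0 = PySem.List.pyGetD nums k 0 then
            some (match mn with
                  | none => ((i - j).natAbs : Int) + ((j - k).natAbs : Int) + ((k - i).natAbs : Int)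
                  | some m => min m (((i - j).natAbs : Int) + ((j - k).natAbs : Int) + ((k - i).natAbs : Int)))
          else mn) mn) mn) none
  match mn with
  | none => -1
  | some m => m

-- ===== PORT B =====
def minimumDistance_alt (nums : List Int) : Int :=
  let res :=
    (PySem.List.pyRange 0 (nums.length : Int) 1).foldl
      (fun (st : Option Int × PySem.Dict Int (List Int)) k =>
        let v := PySem.List.pyGetD nums k 0
        let ps := st.2.getD v []
        let st1 :=
          if 2 ≤ ps.length then
            let d := 2 * (k - (PySem.List.pyGet? ps (-2)).getD 0)
            (some (match st.1 with | none => d | some b => min b d), st.2)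
          else st
        (st1.1, st1.2.insert v (ps ++ [k])))
      (none, PySem.Dict.empty)
  match res.1 with
  | none => -1
  | some b => b

-- ===== PRECONDITION & SPEC =====
def Spec_minimumDistance (nums : List Int) (out : Int) : Prop := out = minimumDistance_alt nums
instance (nums : List Int) (out : Int) : Decidable (Spec_minimumDistance nums out) := by unfold Spec_minimumDistance; infer_instance

-- ===== CLAIM (what is proved, stated in full; the proofs are below) =====
def Claim_equal_minimumDistance : Prop := ∀ (nums : List Int), Dom_minimumDistance nums → Spec_minimumDistance nums (minimumDistance nums)

-- ===== LEMMAS AND PROOFS =====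

-- the running-min step (Python's `min(best, d)` with a None/inf start), shared shape of both loops
def mstep (acc : Option Int) (v : Int) : Option Int :=
  some (match acc with | none => v | some m => min m v)

-- positions t < k with nums[t] = v
def prevV (nums : List Int) (k : Nat) (v : Int) : List Nat :=
  (List.range k).filter (fun t => nums.getD t 0 == v)

def prevP (nums : List Int) (k : Nat) : List Nat := prevV nums k (nums.getD k 0)

-- second-to-last element
def slast (l : List Nat) : Nat := l.getD (l.length - 2) 0

-- B's candidate list restricted to indices < K
def bcandsUpto (nums : List Int) (K : Nat) : List Int :=
  (List.range K).filterMap (fun k =>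
    if 2 ≤ (prevP nums k).length then
      some (2 * ((k : Int) - (slast (prevP nums k) : Int)))
    else none)

def bcands (nums : List Int) : List Int := bcandsUpto nums nums.length

-- A's candidate list (every triple i<j<k with equal values, A's literal value)
def acands (nums : List Int) : List Int :=
  let n : Int := nums.length
  (PySem.List.pyRange 0 n 1).flatMap (fun i =>
    (PySem.List.pyRange (i + 1) n 1).flatMap (fun j =>
      ((PySem.List.pyRange (j + 1) n 1).filter (fun k =>
          decide (PySem.List.pyGetD nums i 0 = PySem.List.pyGetD nums j 0 ∧
                  PySem.List.pyGetD nums j 0 = PySem.List.pyGetD nums k 0))).map (fun k =>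
        ((i - j).natAbs : Int) + ((j - k).natAbs : Int) + ((k - i).natAbs : Int))))

lemma foldl_mstep_some (l : List Int) (a : Int) : l.foldl mstep (some a) = some (l.foldl min a) := by
  induction l generalizing a with
  | nil => rfl
  | cons x xs ih => simpa [mstep] using ih (min a x)

lemma foldl_mstep_none (l : List Int) : l.foldl mstep none = l.min? := by
  cases l with
  | nil => rfl
  | cons x xs => simp [List.min?, mstep, foldl_mstep_some]

lemma foldl_flatMap_eq {α β γ : Type} (f : β → γ → β) (g : α → List γ) (l : List α) (init : β) :
    (l.flatMap g).foldl f init = l.foldl (fun acc x => (g x).foldl f acc) init := by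
  induction l generalizing init with
  | nil => rfl
  | cons x xs ih => simp [List.flatMap_cons, List.foldl_append, ih]

-- A's nested loops compute the running min of acands
lemma minimumDistance_eq_min (nums : List Int) :
    minimumDistance nums = (match (acands nums).min? with | none => -1 | some m => m) := by
  rw [← foldl_mstep_none]
  unfold minimumDistance acands
  simp only [foldl_flatMap_eq, PySem.List.foldl_ite_eq_foldl_filter, List.foldl_map, mstep]

-- B's pass computes the running min of bcands
-- the loop body of B's port, named for the invariant proof
def bstep (nums : List Int) (st : Option Int × PySem.Dict Int (List Int)) (k : Int) :
    Option Int × PySem.Dict Int (List Int) :=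
  let v := PySem.List.pyGetD nums k 0
  let ps := st.2.getD v []
  let st1 :=
    if 2 ≤ ps.length then
      let d := 2 * (k - (PySem.List.pyGet? ps (-2)).getD 0)
      (some (match st.1 with | none => d | some b => min b d), st.2)
    else st
  (st1.1, st1.2.insert v (ps ++ [k]))

lemma prevV_succ (nums : List Int) (K : Nat) (v : Int) :
    prevV nums (K + 1) v = prevV nums K v ++ (if nums.getD K 0 == v then [K] else []) := by
  unfold prevV
  rw [List.range_succ, List.filter_append]
  simp [List.filter_cons]

lemma bcandsUpto_succ (nums : List Int) (K : Nat) :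
    bcandsUpto nums (K + 1) = bcandsUpto nums K ++
      (if 2 ≤ (prevP nums K).length then [2 * ((K : Int) - (slast (prevP nums K) : Int))] else []) := by
  unfold bcandsUpto
  rw [List.range_succ, List.filterMap_append]
  simp only [List.filterMap_cons, List.filterMap_nil]
  split_ifs <;> rfl

lemma bstep_eval (nums : List Int) (K : Nat) (b0 : Option Int) (d : PySem.Dict Int (List Int))
    (hd : ∀ v : Int, d.getD v [] = (prevV nums K v).map Int.ofNat) :
    bstep nums (b0, d) (K : Int) =
      ((if 2 ≤ (prevP nums K).length then
          mstep b0 (2 * ((K : Int) - (slast (prevP nums K) : Int))) else b0),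
       d.insert (nums.getD K 0) ((prevP nums K).map Int.ofNat ++ [(K : Int)])) := by
  simp only [bstep, PySem.List.pyGetD_natCast]
  rw [hd (nums.getD K 0)]
  have hpp : prevV nums K (nums.getD K 0) = prevP nums K := rfl
  rw [hpp]
  simp only [List.length_map]
  by_cases h2 : 2 ≤ (prevP nums K).length
  · have hlen : (prevP nums K).length - 2 < (prevP nums K).length := by omega
    have hget : (PySem.List.pyGet? ((prevP nums K).map Int.ofNat) (-2)).getD 0
        = (slast (prevP nums K) : Int) := by
      rw [PySem.List.pyGet?_neg_ofNat _ 2 (by omega) (by rw [List.length_map]; exact h2)]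
      rw [List.length_map, List.getElem?_eq_getElem (by rw [List.length_map]; exact hlen)]
      simp only [List.getElem_map, Option.getD_some]
      unfold slast
      rw [List.getD_eq_getElem _ _ hlen]
      simp [Int.ofNat_eq_natCast]
    rw [if_pos h2, if_pos h2]
    simp only [mstep]
    rw [hget]
  · rw [if_neg h2, if_neg h2]

lemma bfold_inv (nums : List Int) (K : Nat) :
    ∃ d : PySem.Dict Int (List Int),
      (PySem.List.pyRange 0 (K : Int) 1).foldl (bstep nums) (none, PySem.Dict.empty)
        = ((bcandsUpto nums K).foldl mstep none, d)
      ∧ ∀ v : Int, d.getD v [] = (prevV nums K v).map Int.ofNat := by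
  induction K with
  | zero =>
    refine ⟨PySem.Dict.empty, by simp [PySem.List.pyRange_one_eq_nil, bcandsUpto], fun v => ?_⟩
    simp [prevV, PySem.Dict.getD_empty]
  | succ K ih =>
    rcases ih with ⟨d, hfold, hd⟩
    have hcast : ((K + 1 : Nat) : Int) = (K : Int) + 1 := by push_cast; ring
    rw [hcast, PySem.List.pyRange_one_succ_right (by positivity), List.foldl_append, hfold]
    simp only [List.foldl_cons, List.foldl_nil]
    rw [bstep_eval nums K _ d hd]
    refine ⟨d.insert (nums.getD K 0) (List.map Int.ofNat (prevP nums K) ++ [(K : Int)]), ?_, ?_⟩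
    · have hfst : (if 2 ≤ (prevP nums K).length then
          mstep (List.foldl mstep none (bcandsUpto nums K)) (2 * ((K : Int) - (slast (prevP nums K) : Int)))
          else List.foldl mstep none (bcandsUpto nums K))
          = List.foldl mstep none (bcandsUpto nums (K + 1)) := by
        rw [bcandsUpto_succ, List.foldl_append]
        split_ifs with h2 <;> simp
      rw [hfst]
    · intro v
      rw [PySem.Dict.getD_insert, prevV_succ, List.map_append]
      by_cases hv : v = nums.getD K 0
      · subst hv
        rw [if_pos rfl]
        simp [prevP]
      · have hb : nums.getD K 0 ≠ v := fun h => hv h.symm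
        rw [if_neg hv, if_neg (by simpa using hb), hd]
        simp

lemma minimumDistance_alt_eq_min (nums : List Int) :
    minimumDistance_alt nums = (match (bcands nums).min? with | none => -1 | some m => m) := by
  rcases bfold_inv nums nums.length with ⟨d, hfold, -⟩
  have : minimumDistance_alt nums =
      (match ((PySem.List.pyRange 0 (nums.length : Int) 1).foldl (bstep nums)
               (none, PySem.Dict.empty)).1 with
       | none => -1 | some b => b) := rfl
  rw [this, hfold, ← foldl_mstep_none]
  rfl

lemma prevV_pairwise (nums : List Int) (k : Nat) (v : Int) :
    (prevV nums k v).Pairwise (· < ·) :=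
  List.Pairwise.sublist List.filter_sublist List.pairwise_lt_range

lemma mem_prevV (nums : List Int) (k : Nat) (v : Int) (t : Nat) :
    t ∈ prevV nums k v ↔ t < k ∧ nums.getD t 0 = v := by
  simp [prevV, List.mem_filter, List.mem_range]

lemma two_le_of_mem_ne {l : List Nat} {a b : Nat} (ha : a ∈ l) (hb : b ∈ l) (hne : a ≠ b) :
    2 ≤ l.length := by
  cases l with
  | nil => cases ha
  | cons x t =>
    cases t with
    | nil =>
      rw [List.mem_singleton] at ha hb
      exact absurd (ha.trans hb.symm) hne
    | cons y u =>
      simp only [List.length_cons]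
      omega

lemma pairwise_getElem_le {l : List Nat} (hp : l.Pairwise (· < ·)) {p q : Nat}
    (hpq : p ≤ q) (hq : q < l.length) : l[p]'(by omega) ≤ l[q] := by
  rcases Nat.eq_or_lt_of_le hpq with rfl | h
  · exact le_rfl
  · exact le_of_lt (List.pairwise_iff_getElem.mp hp p q (by omega) hq h)

lemma mem_bcands (nums : List Int) (v : Int) :
    v ∈ bcands nums ↔ ∃ k, k < nums.length ∧ 2 ≤ (prevP nums k).length ∧
      v = 2 * ((k : Int) - (slast (prevP nums k) : Int)) := by
  simp only [bcands, bcandsUpto, List.mem_filterMap, List.mem_range]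
  constructor
  · rintro ⟨k, hk, hif⟩
    split_ifs at hif with h2
    · exact ⟨k, hk, h2, (Option.some_inj.mp hif).symm⟩
  · rintro ⟨k, hk, h2, rfl⟩
    exact ⟨k, hk, by rw [if_pos h2]⟩

lemma mem_acands (nums : List Int) (v : Int) :
    v ∈ acands nums ↔ ∃ i j k : Int,
      (0 ≤ i ∧ i < (nums.length : Int)) ∧ (i + 1 ≤ j ∧ j < (nums.length : Int)) ∧
      (j + 1 ≤ k ∧ k < (nums.length : Int)) ∧
      (PySem.List.pyGetD nums i 0 = PySem.List.pyGetD nums j 0 ∧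
       PySem.List.pyGetD nums j 0 = PySem.List.pyGetD nums k 0) ∧
      v = ((i - j).natAbs : Int) + ((j - k).natAbs : Int) + ((k - i).natAbs : Int) := by
  simp only [acands, List.mem_flatMap, List.mem_map, List.mem_filter,
    PySem.List.mem_pyRange_one, decide_eq_true_eq]
  tauto

lemma bcands_subset (nums : List Int) : ∀ v ∈ bcands nums, v ∈ acands nums := by
  intro v hv
  rw [mem_bcands] at hv
  rcases hv with ⟨k, hk, h2, rfl⟩
  have hpair : (prevP nums k).Pairwise (· < ·) := prevV_pairwise nums k _
  have hl2 : (prevP nums k).length - 2 < (prevP nums k).length := by omega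
  have hl1 : (prevP nums k).length - 1 < (prevP nums k).length := by omega
  set L := prevP nums k with hL
  have hij : L[L.length - 2] < L[L.length - 1] :=
    List.pairwise_iff_getElem.mp hpair _ _ hl2 hl1 (by omega)
  obtain ⟨hik, hiv⟩ := (mem_prevV nums k _ _).mp (List.getElem_mem hl2)
  obtain ⟨hjk, hjv⟩ := (mem_prevV nums k _ _).mp (List.getElem_mem hl1)
  rw [mem_acands]
  refine ⟨(L[L.length - 2] : Int), (L[L.length - 1] : Int), (k : Int),
    ⟨by positivity, by omega⟩, ⟨by omega, by omega⟩, ⟨by omega, by omega⟩, ⟨?_, ?_⟩, ?_⟩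
  · simp only [PySem.List.pyGetD_natCast]
    rw [hiv, hjv]
  · simp only [PySem.List.pyGetD_natCast]
    exact hjv
  · have hsl : slast L = L[L.length - 2] := by
      unfold slast
      rw [List.getD_eq_getElem _ _ hl2]
    rw [hsl]
    omega

lemma acands_dominated (nums : List Int) : ∀ v ∈ acands nums, ∃ w ∈ bcands nums, w ≤ v := by
  intro v hv
  rw [mem_acands] at hv
  rcases hv with ⟨i, j, k, ⟨hi0, hin⟩, ⟨hij, hjn⟩, ⟨hjk, hkn⟩, ⟨e1, e2⟩, rfl⟩
  have hj0 : 0 ≤ j := by omega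
  have hk0 : 0 ≤ k := by omega
  have hia : ((i.toNat : Int)) = i := Int.toNat_of_nonneg hi0
  have hja : ((j.toNat : Int)) = j := Int.toNat_of_nonneg hj0
  have hka : ((k.toNat : Int)) = k := Int.toNat_of_nonneg hk0
  have hgi : PySem.List.pyGetD nums i 0 = nums.getD i.toNat 0 := by
    rw [PySem.List.pyGetD_eq_getElem nums 0 hi0 hin, List.getD_eq_getElem _ _ (by omega)]
  have hgj : PySem.List.pyGetD nums j 0 = nums.getD j.toNat 0 := by
    rw [PySem.List.pyGetD_eq_getElem nums 0 hj0 hjn, List.getD_eq_getElem _ _ (by omega)]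
  have hgk : PySem.List.pyGetD nums k 0 = nums.getD k.toNat 0 := by
    rw [PySem.List.pyGetD_eq_getElem nums 0 hk0 hkn, List.getD_eq_getElem _ _ (by omega)]
  set L := prevP nums k.toNat with hL
  have ha : i.toNat ∈ L := by
    rw [hL, prevP, mem_prevV]
    exact ⟨by omega, by rw [← hgi, e1, e2, hgk]⟩
  have hb : j.toNat ∈ L := by
    rw [hL, prevP, mem_prevV]
    exact ⟨by omega, by rw [← hgj, e2, hgk]⟩
  have hab : i.toNat < j.toNat := by omega
  have h2 : 2 ≤ L.length := two_le_of_mem_ne ha hb (by omega)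
  have hkn' : k.toNat < nums.length := by omega
  refine ⟨2 * ((k.toNat : Int) - (slast L : Int)), (mem_bcands nums _).mpr ⟨k.toNat, hkn', h2, rfl⟩, ?_⟩
  have hpair : L.Pairwise (· < ·) := prevV_pairwise nums k.toNat _
  obtain ⟨pa, hpa, hpaeq⟩ := List.mem_iff_getElem.mp ha
  obtain ⟨pb, hpb, hpbeq⟩ := List.mem_iff_getElem.mp hb
  have hpapb : pa < pb := by
    by_contra hcon
    rcases Nat.eq_or_lt_of_le (Nat.le_of_not_lt hcon) with heq | hlt
    · subst heq; omega
    · have := List.pairwise_iff_getElem.mp hpair pb pa hpb hpa hlt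
      omega
  have hpa2 : pa ≤ L.length - 2 := by omega
  have hsl : i.toNat ≤ slast L := by
    have hl2 : L.length - 2 < L.length := by omega
    have hmono : L[pa]'hpa ≤ L[L.length - 2]'hl2 := pairwise_getElem_le hpair hpa2 hl2
    have : slast L = L[L.length - 2]'hl2 := by
      unfold slast
      rw [List.getD_eq_getElem _ _ hl2]
    omega
  omega

lemma min?_eq_of_dominates (aL bL : List Int)
    (h1 : ∀ v ∈ bL, v ∈ aL) (h2 : ∀ v ∈ aL, ∃ w ∈ bL, w ≤ v) : aL.min? = bL.min? := by
  cases ha : aL.min? with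
  | none =>
    rw [List.min?_eq_none_iff] at ha
    cases hb : bL.min? with
    | none => rfl
    | some m =>
      have := h1 m (List.min?_mem hb)
      simp [ha] at this
  | some m =>
    have hmem := List.min?_mem ha
    have hle : ∀ b ∈ aL, m ≤ b := (List.le_min?_iff ha).mp le_rfl
    cases hb : bL.min? with
    | none =>
      rw [List.min?_eq_none_iff] at hb
      rcases h2 m hmem with ⟨w, hw, -⟩
      simp [hb] at hw
    | some m' =>
      have hmem' := List.min?_mem hb
      have hle' : ∀ b ∈ bL, m' ≤ b := (List.le_min?_iff hb).mp le_rfl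
      rcases h2 m hmem with ⟨w, hwb, hwle⟩
      exact congrArg some (le_antisymm (hle _ (h1 _ hmem')) (le_trans (hle' _ hwb) hwle))

-- ===== VERDICT (by name: the statement is the Claim_ definition above) =====
theorem minimumDistance_spec : Claim_equal_minimumDistance := by
  intro nums _
  unfold Spec_minimumDistance
  rw [minimumDistance_eq_min, minimumDistance_alt_eq_min,
      min?_eq_of_dominates (acands nums) (bcands nums) (bcands_subset nums) (acands_dominated nums)]
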